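-- pv_equiv track=rewrite | github.com/yysmlz/BBG | bloomberg/1614. Maximum Nesting Depth of the Parentheses/variant.py | print_deepest_parentheses
-- ===== SOURCE A (Python) =====
-- def print_deepest_parentheses(s: str) -> list:
--         max_depth = 0  # 记录最大深度
--         current_depth = 0  # 当前深度
--         current_content = []  # 临时存储当前括号内容
--         result = []  # 存储最深层次的内容
--
--         for char in s:
--             if char == '(':
--                 current_depth += 1
--                 # 重置当前内容，准备记录新括号内的内容
--                 current_content = []
--             elif char == ')':
--                 # 遇到右括号，说明当前括号内容结束
--                 if current_depth > max_depth:
--                     # 发现更深层次，更新最大深度和结果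
--                     max_depth = current_depth
--                     result = [''.join(current_content)]
--                 elif current_depth == max_depth:
--                     # 同一深度，添加到结果
--                     result.append(''.join(current_content))
--                 # 退出当前括号，深度减1
--                 current_depth -= 1
--             else:
--                 # 普通字符，只有当处于括号内时才记录
--                 if current_depth > 0:
--                     current_content.append(char)
--
--         return result
-- ===== SOURCE B (Python) =====
-- def print_deepest_parentheses(s: str) -> list:
--     # pass 1: find the deepest depth at which any ')' closes (0 if none does)
--     max_depth = 0
--     depth = 0
--     for ch in s:
--         if ch == '(':
--             depth += 1
--         elif ch == ')':
--             max_depth = max(max_depth, depth)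
--             depth -= 1
--     # pass 2: collect the buffered contents closed exactly at that depth
--     depth = 0
--     content = []
--     result = []
--     for ch in s:
--         if ch == '(':
--             depth += 1
--             content = []
--         elif ch == ')':
--             if depth == max_depth:
--                 result.append(''.join(content))
--             depth -= 1
--         else:
--             if depth > 0:
--                 content.append(ch)
--     return result
-- ===== Notes on version B (the rewrite author's own statement) =====
-- stated objective: alternative
-- what changed: Replaces A's online result-resetting single pass (which rebuilds/discards the result list whenever a deeper ')' appears) by two independent passes: one that only computes the maximal closing depth, and one that collects exactly the contents closed at that depth.
import Mathlib
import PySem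

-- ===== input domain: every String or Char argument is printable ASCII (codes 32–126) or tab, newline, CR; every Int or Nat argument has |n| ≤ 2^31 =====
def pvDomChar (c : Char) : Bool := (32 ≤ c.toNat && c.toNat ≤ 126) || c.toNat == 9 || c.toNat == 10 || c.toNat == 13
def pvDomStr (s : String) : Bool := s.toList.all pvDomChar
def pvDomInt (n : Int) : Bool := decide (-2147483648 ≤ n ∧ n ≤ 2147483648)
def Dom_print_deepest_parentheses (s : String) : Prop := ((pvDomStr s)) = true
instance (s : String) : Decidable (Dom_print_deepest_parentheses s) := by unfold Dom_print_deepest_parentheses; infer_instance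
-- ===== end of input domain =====

-- B replaces A's online result-resetting single pass by two passes: find the
-- maximal closing depth first, then collect the contents closed at that depth
-- (alternative decomposition, same cost).

-- ===== PORT A =====
-- state: (max_depth, current_depth, current_content, result)
def stepA : (Int × Int × List Char × List String) → Char → (Int × Int × List Char × List String) :=
  fun st ch =>
    let m := st.1; let d := st.2.1; let c := st.2.2.1; let r := st.2.2.2
    if ch = '(' then (m, d + 1, [], r)
    else if ch = ')' then
      if d > m then (d, d - 1, c, [String.mk c])
      else if d = m then (m, d - 1, c, r ++ [String.mk c])
      else (m, d - 1, c, r)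
    else if d > 0 then (m, d, c ++ [ch], r)
    else (m, d, c, r)

def print_deepest_parentheses (s : String) : List String :=
  (s.toList.foldl stepA (0, 0, [], [])).2.2.2

-- ===== PORT B =====
-- pass 1 state: (max_depth, depth)
def stepMax : (Int × Int) → Char → (Int × Int) :=
  fun st ch =>
    let m := st.1; let d := st.2
    if ch = '(' then (m, d + 1)
    else if ch = ')' then (max m d, d - 1)
    else (m, d)

-- pass 2 state: (depth, content, result), M = the maximal closing depth
def stepB (M : Int) : (Int × List Char × List String) → Char → (Int × List Char × List String) :=
  fun st ch =>
    let d := st.1; let c := st.2.1; let r := st.2.2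
    if ch = '(' then (d + 1, [], r)
    else if ch = ')' then
      (if d = M then (d - 1, c, r ++ [String.mk c]) else (d - 1, c, r))
    else if d > 0 then (d, c ++ [ch], r)
    else (d, c, r)

def print_deepest_parentheses_alt (s : String) : List String :=
  let M := (s.toList.foldl stepMax (0, 0)).1
  (s.toList.foldl (stepB M) (0, [], [])).2.2

-- ===== PRECONDITION & SPEC =====
def Spec_print_deepest_parentheses (s : String) (out : List String) : Prop := out = print_deepest_parentheses_alt s
instance (s : String) (out : List String) : Decidable (Spec_print_deepest_parentheses s out) := by unfold Spec_print_deepest_parentheses; infer_instance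

-- ===== CLAIM (what is proved, stated in full; the proofs are below) =====
def Claim_equal_print_deepest_parentheses : Prop := ∀ (s : String), Dom_print_deepest_parentheses s → Spec_print_deepest_parentheses s (print_deepest_parentheses s)

-- ===== LEMMAS AND PROOFS =====

-- the maximal-depth accumulator never decreases
lemma le_maxfold : ∀ (l : List Char) (m d : Int), m ≤ (l.foldl stepMax (m, d)).1 := by
  intro l
  induction l with
  | nil => intro m d; simp
  | cons ch l ih =>
    intro m d
    simp only [List.foldl_cons]
    by_cases h1 : ch = '('
    · simpa [stepMax, h1] using ih m (d + 1)
    · by_cases h2 : ch = ')'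
      · have := ih (max m d) (d - 1)
        simp only [stepMax, h1, h2, if_false, if_true] at *
        exact le_trans (le_max_left m d) this
      · simpa [stepMax, h1, h2] using ih m d

-- pass 2 only appends to its result accumulator
lemma accB : ∀ (l : List Char) (M d : Int) (c : List Char) (r : List String),
    l.foldl (stepB M) (d, c, r)
      = ((l.foldl (stepB M) (d, c, [])).1, (l.foldl (stepB M) (d, c, [])).2.1,
         r ++ (l.foldl (stepB M) (d, c, [])).2.2) := by
  intro l
  induction l with
  | nil => intro M d c r; simp
  | cons ch l ih =>
    intro M d c r
    simp only [List.foldl_cons]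
    by_cases h1 : ch = '('
    · simp only [stepB, h1, if_true]
      rw [ih M (d + 1) [] r]
    · by_cases h2 : ch = ')'
      · simp only [stepB, h2, Char.reduceEq, reduceIte]
        by_cases h3 : d = M
        · rw [if_pos h3, if_pos h3]
          rw [ih M (d - 1) c (r ++ [String.mk c]), ih M (d - 1) c ([] ++ [String.mk c])]
          simp
        · rw [if_neg h3, if_neg h3]
          exact ih M (d - 1) c r
      · by_cases h4 : d > 0
        · simp only [stepB, h1, h2, h4, if_false, if_true]
          exact ih M d (c ++ [ch]) r
        · simp only [stepB, h1, h2, h4, if_false]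
          exact ih M d c r

-- core invariant: A's fold equals "keep r iff no deeper ')' comes" + pass-2 collection
lemma mainlem : ∀ (l : List Char) (m d : Int) (c : List Char) (r : List String),
    (l.foldl stepA (m, d, c, r)).2.2.2
      = (if (l.foldl stepMax (m, d)).1 = m then r else [])
          ++ (l.foldl (stepB ((l.foldl stepMax (m, d)).1)) (d, c, [])).2.2 := by
  intro l
  induction l with
  | nil => intro m d c r; simp
  | cons ch l ih =>
    intro m d c r
    simp only [List.foldl_cons]
    by_cases h1 : ch = '('
    · simp only [stepA, stepMax, stepB, h1, if_true]
      exact ih m (d + 1) [] r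
    · by_cases h2 : ch = ')'
      · simp only [stepA, stepMax, stepB, h2, Char.reduceEq, reduceIte]
        rcases lt_trichotomy m d with hdm | hdm | hdm
        · -- d > m : deeper ')', A resets its result
          have hmax : max m d = d := by omega
          rw [hmax]
          set M := (l.foldl stepMax (d, d - 1)).1 with hM
          have hMge : d ≤ M := le_maxfold l d (d - 1)
          rw [if_pos (show d > m from hdm), if_neg (show ¬ M = m by omega)]
          rw [ih d (d - 1) c [String.mk c], ← hM]
          by_cases h3 : d = M
          · rw [if_pos h3, accB l M (d - 1) c ([] ++ [String.mk c]), if_pos h3.symm]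
            simp
          · rw [if_neg h3, if_neg (fun h => h3 h.symm)]
        · -- d = m : same depth, both append
          subst hdm
          rw [if_neg (lt_irrefl m), if_pos rfl, max_self]
          set M := (l.foldl stepMax (m, m - 1)).1 with hM
          have hMge : m ≤ M := le_maxfold l m (m - 1)
          rw [ih m (m - 1) c (r ++ [String.mk c]), ← hM]
          by_cases h3 : m = M
          · rw [if_pos h3, accB l M (m - 1) c ([] ++ [String.mk c]), if_pos h3.symm,
                if_pos h3.symm]
            simp
          · rw [if_neg h3, if_neg (fun h => h3 h.symm), if_neg (fun h => h3 h.symm)]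
        · -- d < m : shallow ')', ignored by both
          have hmax : max m d = m := by omega
          rw [hmax]
          set M := (l.foldl stepMax (m, d - 1)).1 with hM
          have hMge : m ≤ M := le_maxfold l m (d - 1)
          rw [if_neg (show ¬ d > m by omega), if_neg (show ¬ d = m by omega),
              if_neg (show ¬ d = M by omega)]
          exact ih m (d - 1) c r
      · by_cases h4 : d > 0
        · simp only [stepA, stepMax, stepB, h1, h2, h4, if_false, if_true]
          exact ih m d (c ++ [ch]) r
        · simp only [stepA, stepMax, stepB, h1, h2, h4, if_false]
          exact ih m d c r

-- ===== VERDICT (by name: the statement is the Claim_ definition above) =====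
theorem print_deepest_parentheses_spec : Claim_equal_print_deepest_parentheses := by
  intro s _
  unfold Spec_print_deepest_parentheses print_deepest_parentheses print_deepest_parentheses_alt
  rw [mainlem s.toList 0 0 [] []]
  by_cases h : (s.toList.foldl stepMax (0, 0)).1 = 0 <;> simp [h]
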